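-- pv_equiv track=rewrite | github.com/Santhosh93M/PythonBasics | programs/largest_OddEven.py | large_odd_even
-- ===== SOURCE A (Python) =====
-- def large_odd_even(lst):
--     even_max = 0
--     odd_max = 0
--     for i in lst:
--         if i%2==0:
--             if even_max<i:
--                 even_max = i
--         else:
--             if odd_max < i:
--                 odd_max = i
--     return even_max,odd_max
-- ===== SOURCE B (Python) =====
-- def large_odd_even(lst):
--     even_max = max([0] + [i for i in lst if i % 2 == 0])
--     odd_max = max([0] + [i for i in lst if i % 2 != 0])
--     return even_max, odd_max
-- ===== Notes on version B (the rewrite author's own statement) =====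
-- stated objective: idiomatic
-- what changed: Replaces the single accumulating pass with two independent filtered max reductions, each seeded with 0.
import Mathlib
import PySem

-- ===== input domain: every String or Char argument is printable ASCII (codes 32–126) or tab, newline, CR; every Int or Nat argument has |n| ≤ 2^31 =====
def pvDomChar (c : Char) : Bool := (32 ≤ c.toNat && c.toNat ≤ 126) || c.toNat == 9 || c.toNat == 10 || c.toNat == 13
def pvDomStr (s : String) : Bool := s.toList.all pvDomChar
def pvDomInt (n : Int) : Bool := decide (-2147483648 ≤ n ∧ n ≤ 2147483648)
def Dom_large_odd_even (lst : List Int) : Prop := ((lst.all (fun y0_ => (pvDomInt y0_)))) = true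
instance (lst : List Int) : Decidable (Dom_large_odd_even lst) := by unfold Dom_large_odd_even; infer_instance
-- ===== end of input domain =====

-- B computes the pair by two independent filtered max-reductions seeded with 0 (idiomatic decomposition); A is a single accumulating pass.

-- ===== PORT A =====
-- literal transliteration of A's single loop over (even_max, odd_max)
def large_odd_even (lst : List Int) : Int × Int :=
  lst.foldl
    (fun (st : Int × Int) i =>
      if PySem.Int.mod i 2 = 0 then
        (if st.1 < i then (i, st.2) else st)
      else
        (if st.2 < i then (st.1, i) else st))
    (0, 0)

-- ===== PORT B =====
-- max([0] + [i for i in lst if …]) : Python's max over a nonempty list = left fold of max over the tail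
def pyMaxList (x : Int) (xs : List Int) : Int := xs.foldl max x

def large_odd_even_alt (lst : List Int) : Int × Int :=
  (pyMaxList 0 (lst.filter (fun i => PySem.Int.mod i 2 = 0)),
   pyMaxList 0 (lst.filter (fun i => ¬ PySem.Int.mod i 2 = 0)))

-- ===== PRECONDITION & SPEC =====
def Spec_large_odd_even (lst : List Int) (out : Int × Int) : Prop := out = large_odd_even_alt lst
instance (lst : List Int) (out : Int × Int) : Decidable (Spec_large_odd_even lst out) := by unfold Spec_large_odd_even; infer_instance

-- ===== CLAIM (what is proved, stated in full; the proofs are below) =====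
def Claim_equal_large_odd_even : Prop := ∀ (lst : List Int), Dom_large_odd_even lst → Spec_large_odd_even lst (large_odd_even lst)

-- ===== LEMMAS AND PROOFS =====

theorem large_odd_even_fold (lst : List Int) (e o : Int) :
    lst.foldl
      (fun (st : Int × Int) i =>
        if PySem.Int.mod i 2 = 0 then
          (if st.1 < i then (i, st.2) else st)
        else
          (if st.2 < i then (st.1, i) else st))
      (e, o)
    = (pyMaxList e (lst.filter (fun i => PySem.Int.mod i 2 = 0)),
       pyMaxList o (lst.filter (fun i => ¬ PySem.Int.mod i 2 = 0))) := by
  induction lst generalizing e o with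
  | nil => rfl
  | cons x xs ih =>
    have hmax : ∀ a b : Int, (if a < b then b else a) = max a b := by
      intro a b; rw [max_def]; split_ifs <;> omega
    by_cases h : PySem.Int.mod x 2 = 0
    · simp only [List.foldl_cons, List.filter_cons, h, decide_true, not_true, decide_false]
      rw [show (if (e, o).1 < x then (x, (e, o).2) else (e, o)) = ((if e < x then x else e), o) by
            split_ifs <;> rfl, hmax, ih]
      simp [pyMaxList]
    · simp only [List.foldl_cons, List.filter_cons, h, decide_true, decide_false, not_false_iff]
      rw [show (if (e, o).2 < x then ((e, o).1, x) else (e, o)) = (e, (if o < x then x else o)) by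
            split_ifs <;> rfl, hmax, ih]
      simp [pyMaxList]

theorem large_odd_even_spec : Claim_equal_large_odd_even := by
  intro lst _
  unfold Spec_large_odd_even large_odd_even large_odd_even_alt
  exact large_odd_even_fold lst 0 0
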